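-- pv_equiv track=rewrite | github.com/kopchik/itasks | round5/epi/6.8_robot_battery.py | min_battery
-- ===== SOURCE A (Python) =====
-- def min_battery(l):
--   assert len(l) > 2
--   battery = 0
--   min_battery = 0
--   cur = l[0]
--   for i, nxt in enumerate(l[1:], 1):
--     battery += (nxt - cur)
--     min_battery = max(battery, min_battery)
--     cur = nxt
--   return min_battery
-- ===== SOURCE B (Python) =====
-- def min_battery(l):
--   assert len(l) > 2
--   return max(l) - l[0]
-- ===== Notes on version B (the rewrite author's own statement) =====
-- stated objective: simpler
-- what changed: Replaces the running-battery loop with the closed form max(l) - l[0] (the loop accumulator telescopes to l[i]-l[0], whose running maximum floored at 0 is max(l)-l[0]).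
import Mathlib
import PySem

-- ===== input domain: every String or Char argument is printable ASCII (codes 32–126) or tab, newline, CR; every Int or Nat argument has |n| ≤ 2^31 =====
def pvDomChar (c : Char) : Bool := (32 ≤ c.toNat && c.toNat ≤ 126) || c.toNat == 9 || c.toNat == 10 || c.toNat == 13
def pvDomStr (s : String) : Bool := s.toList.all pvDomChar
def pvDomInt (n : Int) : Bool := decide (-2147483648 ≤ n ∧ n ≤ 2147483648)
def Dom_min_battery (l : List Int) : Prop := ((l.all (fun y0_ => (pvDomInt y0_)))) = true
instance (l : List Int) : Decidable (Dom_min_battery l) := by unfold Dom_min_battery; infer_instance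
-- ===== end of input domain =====

-- B replaces A's running-battery/running-max loop with the closed form max(l) - l[0] (simpler).
-- Pre_ excludes lists of length ≤ 2, on which A's 'assert len(l) > 2' raises AssertionError.

-- ===== PORT A =====
-- A's for-loop over l[1:] with state (battery, min_battery, cur); the enumerate index is unused.
def min_battery_loop : List Int → Int → Int → Int → Int
  | [], _, m, _ => m
  | nxt :: rest, battery, m, cur =>
      min_battery_loop rest (battery + (nxt - cur)) (max (battery + (nxt - cur)) m) nxt

def min_battery (l : List Int) : Int :=
  match PySem.List.pyGet? l 0 with
  | none => 0  -- unreachable under Pre_ (assert len(l) > 2)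
  | some cur => min_battery_loop (PySem.List.slice l (some 1) none) 0 0 cur

-- ===== PORT B =====
def min_battery_alt (l : List Int) : Int :=
  ((PySem.List.max? l (fun y => y)).getD 0) - ((PySem.List.pyGet? l 0).getD 0)

-- ===== PRECONDITION & SPEC =====
def Pre_min_battery (l : List Int) : Prop := l.length > 2
instance (l : List Int) : Decidable (Pre_min_battery l) := by unfold Pre_min_battery; infer_instance
def pvWitness_min_battery : List Int := [3, 1, 5]

def Spec_min_battery (l : List Int) (out : Int) : Prop := out = min_battery_alt l
instance (l : List Int) (out : Int) : Decidable (Spec_min_battery l out) := by unfold Spec_min_battery; infer_instance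

-- ===== CLAIM (what is proved, stated in full; the proofs are below) =====
def Claim_equal_min_battery : Prop := ∀ (l : List Int), Dom_min_battery l → Pre_min_battery l → Spec_min_battery l (min_battery l)

-- ===== LEMMAS AND PROOFS =====
-- The battery accumulator telescopes: from state (c - a, m, c) the loop is a running max of (x - a).
theorem min_battery_loop_eq (xs : List Int) (a : Int) : ∀ (c m : Int),
    min_battery_loop xs (c - a) m c = xs.foldl (fun m x => max (x - a) m) m := by
  induction xs with
  | nil => intro c m; simp [min_battery_loop]
  | cons x t ih =>
      intro c m
      have h : c - a + (x - c) = x - a := by ring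
      simp only [min_battery_loop, List.foldl, h]
      exact ih x (max (x - a) m)

theorem foldl_max_shift (xs : List Int) (a : Int) : ∀ (m : Int),
    xs.foldl (fun m x => max (x - a) m) m = (xs.foldl (fun m x => max x m) (m + a)) - a := by
  induction xs with
  | nil => intro m; simp
  | cons x t ih =>
      intro m
      simp only [List.foldl, ih]
      have : max (x - a) m + a = max x (m + a) := by
        rcases le_total x (m + a) with h | h <;> simp [max_def] <;> omega
  
      rw [this]

theorem foldl_max_comm (xs : List Int) : ∀ (m : Int),
    xs.foldl (fun m x => max x m) m = xs.foldl max m := by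
  induction xs with
  | nil => intro m; rfl
  | cons x t ih => intro m; simp only [List.foldl]; rw [ih, max_comm]

-- ===== VERDICT (by name: the statement is the Claim_ definition above) =====
theorem min_battery_spec : Claim_equal_min_battery := by
  intro l _ hpre
  unfold Spec_min_battery
  match l, hpre with
  | a :: xs, _ =>
    have hA : min_battery (a :: xs) = min_battery_loop xs 0 0 a := by
      simp [min_battery, PySem.List.pyGet?, PySem.List.pyIdx?, PySem.List.slice_from_one]
    have hloop := min_battery_loop_eq xs a a 0
    rw [show a - a = (0 : Int) by ring] at hloop
    rw [hA, hloop, foldl_max_shift, foldl_max_comm]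
    unfold min_battery_alt
    rw [PySem.List.max?_id_cons]
    simp [PySem.List.pyGet?, PySem.List.pyIdx?]
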